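-- pv_equiv track=rewrite | github.com/pgm1980/mutmut-win | tests/e2e_projects/stress_test/src/stress_lib/validators.py | exactly_one
-- ===== SOURCE A (Python) =====
-- def exactly_one(values: list[object]) -> bool:
--     """Return True if exactly one value is truthy."""
--     count = 0
--     for v in values:
--         if v:
--             count += 1
--         if count > 1:
--             return False
--     return count == 1
-- ===== SOURCE B (Python) =====
-- def exactly_one(values: list[object]) -> bool:
--     """Return True if exactly one value is truthy."""
--     return sum(map(bool, values)) == 1
-- ===== Notes on version B (the rewrite author's own statement) =====
-- stated objective: idiomatic
-- what changed: Replaces the stateful counter loop with early return by a total reduction: map each value to bool, sum the whole list (no short-circuit, no loop state), and compare the sum with 1.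
import Mathlib
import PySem

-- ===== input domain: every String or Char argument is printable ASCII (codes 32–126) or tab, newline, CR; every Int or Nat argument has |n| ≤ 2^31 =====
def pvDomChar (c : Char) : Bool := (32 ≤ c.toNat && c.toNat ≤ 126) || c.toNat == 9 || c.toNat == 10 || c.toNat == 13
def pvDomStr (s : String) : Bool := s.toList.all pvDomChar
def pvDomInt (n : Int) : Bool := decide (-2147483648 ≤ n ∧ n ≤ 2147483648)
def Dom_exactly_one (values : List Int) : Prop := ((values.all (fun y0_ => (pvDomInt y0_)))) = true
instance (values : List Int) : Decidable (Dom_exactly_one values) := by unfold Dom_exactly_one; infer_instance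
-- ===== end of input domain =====

-- B replaces A's stateful counter loop (early return) by a total reduction: sum of bools compared with 1 (idiomatic).


-- ===== PORT A =====
-- A: counter loop, early return as soon as the counter exceeds 1.
def exactlyOneLoopA (count : Int) : List Int → Bool
  | [] => count == 1
  | v :: rest =>
    let count' := if v ≠ 0 then count + 1 else count
    if count' > 1 then false else exactlyOneLoopA count' rest

def exactly_one (values : List Int) : Bool := exactlyOneLoopA 0 values

-- ===== PORT B =====
-- B: sum(map(bool, values)) == 1 — bool(v) is 1 for truthy, 0 otherwise;
-- the whole list is summed, then the sum is compared with 1.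
def exactly_one_alt (values : List Int) : Bool :=
  ((values.map (fun v => if v ≠ 0 then (1 : Int) else 0)).foldl (· + ·) 0) == 1

-- ===== PRECONDITION & SPEC =====
def Spec_exactly_one (values : List Int) (out : Bool) : Prop := out = exactly_one_alt values
instance (values : List Int) (out : Bool) : Decidable (Spec_exactly_one values out) := by unfold Spec_exactly_one; infer_instance

-- ===== CLAIM (what is proved, stated in full; the proofs are below) =====
def Claim_equal_exactly_one : Prop := ∀ (values : List Int), Dom_exactly_one values → Spec_exactly_one values (exactly_one values)

-- ===== LEMMAS AND PROOFS =====
-- B's sum, started from an arbitrary accumulator c.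
def sumB (c : Int) (l : List Int) : Int :=
  (l.map (fun v => if v ≠ 0 then (1 : Int) else 0)).foldl (· + ·) c

lemma sumB_cons (c : Int) (v : Int) (l : List Int) :
    sumB c (v :: l) = sumB (c + (if v ≠ 0 then 1 else 0)) l := by
  simp [sumB]

lemma sumB_ge (c : Int) (l : List Int) : c ≤ sumB c l := by
  induction l generalizing c with
  | nil => simp [sumB]
  | cons v rest ih =>
    rw [sumB_cons]
    refine le_trans ?_ (ih _)
    split <;> omega

lemma loopA_sumB (c : Int) (l : List Int) (hc : c ≤ 1) :
    exactlyOneLoopA c l = (sumB c l == 1) := by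
  induction l generalizing c with
  | nil => simp [exactlyOneLoopA, sumB]
  | cons v rest ih =>
    rw [sumB_cons]
    by_cases h : v = 0
    · have hc' : ¬ (1 : Int) < c := by omega
      simp [exactlyOneLoopA, h, hc']
      exact ih c hc
    · simp only [exactlyOneLoopA, h, ne_eq, not_false_eq_true, if_pos]
      by_cases h2 : c + 1 > 1
      · have := sumB_ge (c + 1) rest
        simp [h2]
        omega
      · simp [h2]
        exact ih (c + 1) (by omega)

-- ===== VERDICT (by name: the statement is the Claim_ definition above) =====
theorem exactly_one_spec : Claim_equal_exactly_one := by
  intro values _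
  unfold Spec_exactly_one exactly_one exactly_one_alt
  exact loopA_sumB 0 values (by omega)
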